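-- pv_equiv track=rewrite | github.com/spyderweb47/Vibe-Trade | core/data/fetcher.py | _normalize_ccxt_symbol
-- ===== SOURCE A (Python) =====
-- _CRYPTO_QUOTES = {"USDT", "USDC", "BUSD", "USD", "BTC", "ETH", "DAI", "TUSD", "USDS", "EUR", "GBP"}
--
-- def _normalize_ccxt_symbol(symbol: str) -> str:
--     """Convert 'BTC-USDT', 'BTCUSDT', or 'BTC' into 'BTC/USDT'."""
--     s = symbol.strip().upper()
--     if "/" in s:
--         return s
--     if "-" in s:
--         return s.replace("-", "/")
--     # Try splitting "BTCUSDT" → "BTC/USDT" by checking quote suffixes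
--     for q in sorted(_CRYPTO_QUOTES, key=len, reverse=True):
--         if s.endswith(q) and len(s) > len(q):
--             base = s[: -len(q)]
--             return f"{base}/{q}"
--     # Bare base — default quote = USDT
--     return f"{s}/USDT"
-- ===== SOURCE B (Python) =====
-- _CRYPTO_QUOTES = {"USDT", "USDC", "BUSD", "USD", "BTC", "ETH", "DAI", "TUSD", "USDS", "EUR", "GBP"}
--
-- def _build_suffix_trie():
--     """Trie over the REVERSED quote strings, stored as a flat node array:
--     nodes[i] = (accepting, children) with children a dict char -> node index."""
--     nodes = [[False, {}]]
--     for q in _CRYPTO_QUOTES: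
--         i = 0
--         for c in reversed(q):
--             ch = nodes[i][1]
--             if c not in ch:
--                 ch[c] = len(nodes)
--                 nodes.append([False, {}])
--             i = ch[c]
--         nodes[i][0] = True
--     return nodes
--
-- _SUFFIX_TRIE = _build_suffix_trie()
--
-- def _normalize_ccxt_symbol(symbol: str) -> str:
--     """Convert 'BTC-USDT', 'BTCUSDT', or 'BTC' into 'BTC/USDT'."""
--     s = symbol.strip().upper()
--     if "/" in s:
--         return s
--     if "-" in s:
--         return s.replace("-", "/")
--     # Walk the reversed string through the reversed-quote trie in ONE pass,
--     # remembering the deepest accepting depth that leaves a non-empty base.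
--     i, best = 0, 0
--     for d, c in enumerate(reversed(s), 1):
--         j = _SUFFIX_TRIE[i][1].get(c)
--         if j is None:
--             break
--         i = j
--         if _SUFFIX_TRIE[i][0] and d < len(s):
--             best = d
--     if best:
--         return f"{s[:-best]}/{s[-best:]}"
--     return f"{s}/USDT"
-- ===== Notes on version B (the rewrite author's own statement) =====
-- stated objective: alternative
-- what changed: The suffix case no longer scans the quote set with endswith: B precomputes a trie of the reversed quotes (flat node array) and walks the reversed string through it once, keeping the deepest accepting depth that leaves a non-empty base.
import Mathlib
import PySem

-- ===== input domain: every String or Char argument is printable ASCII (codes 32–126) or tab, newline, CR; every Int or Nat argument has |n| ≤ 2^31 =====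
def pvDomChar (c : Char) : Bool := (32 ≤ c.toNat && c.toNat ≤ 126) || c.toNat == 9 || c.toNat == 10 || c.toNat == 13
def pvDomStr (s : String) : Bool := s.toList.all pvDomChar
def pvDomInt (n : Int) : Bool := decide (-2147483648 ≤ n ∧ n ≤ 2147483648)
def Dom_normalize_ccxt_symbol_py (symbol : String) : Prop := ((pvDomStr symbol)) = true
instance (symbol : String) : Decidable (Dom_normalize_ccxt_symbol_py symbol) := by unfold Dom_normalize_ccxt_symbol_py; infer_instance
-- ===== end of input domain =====

-- B replaces A's endswith-scan over the quote set by a single walk of the reversed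
-- string through a precomputed trie of reversed quotes, keeping the deepest accepting
-- depth that leaves a non-empty base (objective: alternative data structure).

-- ===== PORT A =====
-- sorted(_CRYPTO_QUOTES, key=len, reverse=True): longest quotes first; the order of
-- equal-length quotes comes from set iteration and is irrelevant to the result
-- (at most one quote of a given length can be a suffix of s); one such order fixed here.
def cryptoQuotesSorted : List (List Char) :=
  [['U','S','D','T'], ['U','S','D','C'], ['B','U','S','D'], ['T','U','S','D'], ['U','S','D','S'],
   ['U','S','D'], ['B','T','C'], ['E','T','H'], ['D','A','I'], ['E','U','R'], ['G','B','P']]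

-- the 'for q in sorted(...)' loop: first matching quote wins, none = fall through
def aQuoteLoop (s : List Char) : List (List Char) → Option (List Char)
  | [] => none
  | q :: rest =>
    if PySem.Chars.endswith s q && decide (q.length < s.length) then
      some (PySem.List.slice s none (some (-(q.length : Int))) ++ '/' :: q)
    else aQuoteLoop s rest

def normalize_ccxt_symbol_py (symbol : String) : String :=
  let s := PySem.Chars.upper (PySem.Chars.strip symbol.toList)
  if PySem.Chars.isIn ['/'] s then String.ofList s
  else if PySem.Chars.isIn ['-'] s then String.ofList (PySem.Chars.replace s ['-'] ['/'])
  else match aQuoteLoop s cryptoQuotesSorted with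
    | some r => String.ofList r
    | none => String.ofList (s ++ ['/','U','S','D','T'])

-- ===== PORT B =====
-- _SUFFIX_TRIE = _build_suffix_trie(): a module constant; its value (node array of
-- (accepting, children assoc list), as built by the Python over its set order) is:
def suffixTrie : List (Bool × PySem.Dict Char Nat) :=
  [ (false, PySem.Dict.mk [('I',1),('R',4),('P',7),('T',10),('D',14),('H',19),('C',22),('S',26)]),
    (false, PySem.Dict.mk [('A',2)]), (false, PySem.Dict.mk [('D',3)]), (true, PySem.Dict.mk []),
    (false, PySem.Dict.mk [('U',5)]), (false, PySem.Dict.mk [('E',6)]), (true, PySem.Dict.mk []),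
    (false, PySem.Dict.mk [('B',8)]), (false, PySem.Dict.mk [('G',9)]), (true, PySem.Dict.mk []),
    (false, PySem.Dict.mk [('D',11)]), (false, PySem.Dict.mk [('S',12)]), (false, PySem.Dict.mk [('U',13)]), (true, PySem.Dict.mk []),
    (false, PySem.Dict.mk [('S',15)]), (false, PySem.Dict.mk [('U',16)]), (true, PySem.Dict.mk [('B',17),('T',18)]), (true, PySem.Dict.mk []), (true, PySem.Dict.mk []),
    (false, PySem.Dict.mk [('T',20)]), (false, PySem.Dict.mk [('E',21)]), (true, PySem.Dict.mk []),
    (false, PySem.Dict.mk [('D',23),('T',30)]), (false, PySem.Dict.mk [('S',24)]), (false, PySem.Dict.mk [('U',25)]), (true, PySem.Dict.mk []),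
    (false, PySem.Dict.mk [('D',27)]), (false, PySem.Dict.mk [('S',28)]), (false, PySem.Dict.mk [('U',29)]), (true, PySem.Dict.mk []),
    (false, PySem.Dict.mk [('B',31)]), (true, PySem.Dict.mk []) ]

-- the 'for d, c in enumerate(reversed(s), 1)' walk: i = node index, d = depth so far,
-- best = deepest accepting depth seen with d < len(s); break on a missing child
def bTrieWalk (slen : Nat) : List Char → Nat → Nat → Nat → Nat
  | [], _, _, best => best
  | c :: rest, i, d, best =>
    match PySem.Dict.get? (suffixTrie.getD i (false, PySem.Dict.mk [])).2 c with
    | none => best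
    | some j =>
      let best' := if (suffixTrie.getD j (false, PySem.Dict.mk [])).1 && decide (d + 1 < slen) then d + 1 else best
      bTrieWalk slen rest j (d + 1) best'

def normalize_ccxt_symbol_py_alt (symbol : String) : String :=
  let s := PySem.Chars.upper (PySem.Chars.strip symbol.toList)
  if PySem.Chars.isIn ['/'] s then String.ofList s
  else if PySem.Chars.isIn ['-'] s then String.ofList (PySem.Chars.replace s ['-'] ['/'])
  else
    let best := bTrieWalk s.length s.reverse 0 0 0
    if best ≠ 0 then
      String.ofList (PySem.List.slice s none (some (-(best : Int))) ++
                     '/' :: PySem.List.slice s (some (-(best : Int))) none)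
    else String.ofList (s ++ ['/','U','S','D','T'])

-- ===== PRECONDITION & SPEC =====
def Spec_normalize_ccxt_symbol_py (symbol : String) (out : String) : Prop := out = normalize_ccxt_symbol_py_alt symbol
instance (symbol : String) (out : String) : Decidable (Spec_normalize_ccxt_symbol_py symbol out) := by unfold Spec_normalize_ccxt_symbol_py; infer_instance

-- ===== CLAIM (what is proved, stated in full; the proofs are below) =====
def Claim_equal_normalize_ccxt_symbol_py : Prop := ∀ (symbol : String), Dom_normalize_ccxt_symbol_py symbol → Spec_normalize_ccxt_symbol_py symbol (normalize_ccxt_symbol_py symbol)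

-- ===== LEMMAS AND PROOFS =====

-- suffix of length n, as A's slice produces it
def sufN (s : List Char) (n : Nat) : List Char := s.drop (s.length - n)

lemma slice_from_eq_sufN (s : List Char) (n : Nat) (h0 : 0 < n) :
    PySem.List.slice s (some (-(n : Int))) none = sufN s n :=
  PySem.List.slice_from_neg_natCast s n h0

lemma endswith_eq_sufN (s q : List Char) (h : q.length ≤ s.length) :
    PySem.Chars.endswith s q = decide (sufN s q.length = q) := by
  rcases Bool.eq_false_or_eq_true (PySem.Chars.endswith s q) with he | he <;> rw [he]
  · symm; rw [decide_eq_true_iff]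
    rw [PySem.Chars.endswith_iff] at he
    rcases he with ⟨t, rfl⟩; simp [sufN]
  · symm; rw [decide_eq_false_iff_not]
    intro h2
    have : q <:+ s := h2 ▸ List.drop_suffix _ _
    rw [← PySem.Chars.endswith_iff] at this
    rw [he] at this; exact Bool.false_ne_true this

-- A's loop over a group of quotes of equal length n behaves like one suffix test
lemma aQuoteLoop_group (s : List Char) (n : Nat) (qs : List (List Char))
    (hall : ∀ q ∈ qs, q.length = n) :
    aQuoteLoop s qs =
      if n < s.length ∧ sufN s n ∈ qs then
        some (PySem.List.slice s none (some (-(n : Int))) ++ '/' :: sufN s n)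
      else none := by
  induction qs with
  | nil => simp [aQuoteLoop]
  | cons q rest ih =>
    have hq : q.length = n := hall q (by simp)
    rw [aQuoteLoop, ih (fun x hx => hall x (by simp [hx]))]
    by_cases hlen : n < s.length
    · rw [endswith_eq_sufN s q (by omega), hq]
      by_cases heq : sufN s n = q
      · simp [heq, hlen]
      · simp [heq, hlen]
    · have hd : decide (q.length < s.length) = false := by rw [hq]; exact decide_eq_false hlen
      simp [hd, hlen]

lemma aQuoteLoop_append (s : List Char) (xs ys : List (List Char)) :
    aQuoteLoop s (xs ++ ys) =
      match aQuoteLoop s xs with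
      | some r => some r
      | none => aQuoteLoop s ys := by
  induction xs with
  | nil => simp [aQuoteLoop]
  | cons q rest ih =>
    rw [List.cons_append, aQuoteLoop, aQuoteLoop]
    by_cases h : (PySem.Chars.endswith s q && decide (q.length < s.length)) = true
    · simp [h]
    · simp [h, ih]

def quotes4 : List (List Char) :=
  [['U','S','D','T'], ['U','S','D','C'], ['B','U','S','D'], ['T','U','S','D'], ['U','S','D','S']]
def quotes3 : List (List Char) :=
  [['U','S','D'], ['B','T','C'], ['E','T','H'], ['D','A','I'], ['E','U','R'], ['G','B','P']]

-- a node with no children ends the walk: the current best is returned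
lemma walk_dead (slen : Nat) (l : List Char) (i d best : Nat)
    (h : (suffixTrie.getD i (false, PySem.Dict.mk [])).2.items = []) :
    bTrieWalk slen l i d best = best := by
  simp only [List.getD_eq_getElem?_getD] at h
  cases l <;> simp [bTrieWalk, PySem.Dict.get?, List.getD_eq_getElem?_getD, h]

-- once the remaining depth budget is exhausted, best can no longer change
lemma walk_noacc (l : List Char) : ∀ (slen i d best : Nat), slen ≤ d + 1 →
    bTrieWalk slen l i d best = best := by
  induction l with
  | nil => intro slen i d best h; rfl
  | cons c rest ih =>
    intro slen i d best h
    rw [bTrieWalk]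
    rcases hg : PySem.Dict.get? (suffixTrie.getD i (false, PySem.Dict.mk [])).2 c with _ | j
    · rfl
    · simp only []
      have hd : decide (d + 1 < slen) = false := by simp; omega
      rw [hd]
      simp only [Bool.and_false]
      exact ih slen j (d+1) best (by omega)

set_option maxHeartbeats 4000000 in
lemma bTrieWalk_char (r : List Char) :
    bTrieWalk r.length r 0 0 0 =
      if 4 < r.length ∧ (r.take 4).reverse ∈ quotes4 then 4
      else if 3 < r.length ∧ (r.take 3).reverse ∈ quotes3 then 3
      else 0 := by
  rcases r with _ | ⟨a, _ | ⟨b, _ | ⟨c, _ | ⟨d, rest⟩⟩⟩⟩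
  · simp_all [bTrieWalk, suffixTrie, walk_dead, walk_noacc, quotes4, quotes3, PySem.Dict.get?] <;> (first | rfl | omega | (split_ifs <;> simp_all <;> omega) | (split <;> simp_all <;> omega) | (intros; simp_all [eq_comm]) | (simp_all [eq_comm]))
  · simp_all [bTrieWalk, suffixTrie, walk_dead, walk_noacc, quotes4, quotes3, PySem.Dict.get?] <;> (first | rfl | omega | (split_ifs <;> simp_all <;> omega) | (split <;> simp_all <;> omega) | (intros; simp_all [eq_comm]) | (simp_all [eq_comm]))
  · -- [a, b]
    by_cases h0I : 'I' = a
    · subst h0I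
      simp_all [bTrieWalk, suffixTrie, walk_dead, walk_noacc, quotes4, quotes3, PySem.Dict.get?] <;> (first | rfl | omega | (split_ifs <;> simp_all <;> omega) | (split <;> simp_all <;> omega) | (intros; simp_all [eq_comm]) | (simp_all [eq_comm]))
    by_cases h0R : 'R' = a
    · subst h0R
      simp_all [bTrieWalk, suffixTrie, walk_dead, walk_noacc, quotes4, quotes3, PySem.Dict.get?] <;> (first | rfl | omega | (split_ifs <;> simp_all <;> omega) | (split <;> simp_all <;> omega) | (intros; simp_all [eq_comm]) | (simp_all [eq_comm]))
    by_cases h0P : 'P' = a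
    · subst h0P
      simp_all [bTrieWalk, suffixTrie, walk_dead, walk_noacc, quotes4, quotes3, PySem.Dict.get?] <;> (first | rfl | omega | (split_ifs <;> simp_all <;> omega) | (split <;> simp_all <;> omega) | (intros; simp_all [eq_comm]) | (simp_all [eq_comm]))
    by_cases h0T : 'T' = a
    · subst h0T
      simp_all [bTrieWalk, suffixTrie, walk_dead, walk_noacc, quotes4, quotes3, PySem.Dict.get?] <;> (first | rfl | omega | (split_ifs <;> simp_all <;> omega) | (split <;> simp_all <;> omega) | (intros; simp_all [eq_comm]) | (simp_all [eq_comm]))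
    by_cases h0D : 'D' = a
    · subst h0D
      simp_all [bTrieWalk, suffixTrie, walk_dead, walk_noacc, quotes4, quotes3, PySem.Dict.get?] <;> (first | rfl | omega | (split_ifs <;> simp_all <;> omega) | (split <;> simp_all <;> omega) | (intros; simp_all [eq_comm]) | (simp_all [eq_comm]))
    by_cases h0H : 'H' = a
    · subst h0H
      simp_all [bTrieWalk, suffixTrie, walk_dead, walk_noacc, quotes4, quotes3, PySem.Dict.get?] <;> (first | rfl | omega | (split_ifs <;> simp_all <;> omega) | (split <;> simp_all <;> omega) | (intros; simp_all [eq_comm]) | (simp_all [eq_comm]))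
    by_cases h0C : 'C' = a
    · subst h0C
      simp_all [bTrieWalk, suffixTrie, walk_dead, walk_noacc, quotes4, quotes3, PySem.Dict.get?] <;> (first | rfl | omega | (split_ifs <;> simp_all <;> omega) | (split <;> simp_all <;> omega) | (intros; simp_all [eq_comm]) | (simp_all [eq_comm]))
    by_cases h0S : 'S' = a
    · subst h0S
      simp_all [bTrieWalk, suffixTrie, walk_dead, walk_noacc, quotes4, quotes3, PySem.Dict.get?] <;> (first | rfl | omega | (split_ifs <;> simp_all <;> omega) | (split <;> simp_all <;> omega) | (intros; simp_all [eq_comm]) | (simp_all [eq_comm]))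
    simp_all [bTrieWalk, suffixTrie, walk_dead, walk_noacc, quotes4, quotes3, PySem.Dict.get?] <;> (first | rfl | omega | (split_ifs <;> simp_all <;> omega) | (split <;> simp_all <;> omega) | (intros; simp_all [eq_comm]) | (simp_all [eq_comm]))
  · -- [a, b, c]
    by_cases h0I : 'I' = a
    · subst h0I
      by_cases h1A : 'A' = b
      · subst h1A
        simp_all [bTrieWalk, suffixTrie, walk_dead, walk_noacc, quotes4, quotes3, PySem.Dict.get?] <;> (first | rfl | omega | (split_ifs <;> simp_all <;> omega) | (split <;> simp_all <;> omega) | (intros; simp_all [eq_comm]) | (simp_all [eq_comm]))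
      simp_all [bTrieWalk, suffixTrie, walk_dead, walk_noacc, quotes4, quotes3, PySem.Dict.get?] <;> (first | rfl | omega | (split_ifs <;> simp_all <;> omega) | (split <;> simp_all <;> omega) | (intros; simp_all [eq_comm]) | (simp_all [eq_comm]))
    by_cases h0R : 'R' = a
    · subst h0R
      by_cases h1U : 'U' = b
      · subst h1U
        simp_all [bTrieWalk, suffixTrie, walk_dead, walk_noacc, quotes4, quotes3, PySem.Dict.get?] <;> (first | rfl | omega | (split_ifs <;> simp_all <;> omega) | (split <;> simp_all <;> omega) | (intros; simp_all [eq_comm]) | (simp_all [eq_comm]))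
      simp_all [bTrieWalk, suffixTrie, walk_dead, walk_noacc, quotes4, quotes3, PySem.Dict.get?] <;> (first | rfl | omega | (split_ifs <;> simp_all <;> omega) | (split <;> simp_all <;> omega) | (intros; simp_all [eq_comm]) | (simp_all [eq_comm]))
    by_cases h0P : 'P' = a
    · subst h0P
      by_cases h1B : 'B' = b
      · subst h1B
        simp_all [bTrieWalk, suffixTrie, walk_dead, walk_noacc, quotes4, quotes3, PySem.Dict.get?] <;> (first | rfl | omega | (split_ifs <;> simp_all <;> omega) | (split <;> simp_all <;> omega) | (intros; simp_all [eq_comm]) | (simp_all [eq_comm]))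
      simp_all [bTrieWalk, suffixTrie, walk_dead, walk_noacc, quotes4, quotes3, PySem.Dict.get?] <;> (first | rfl | omega | (split_ifs <;> simp_all <;> omega) | (split <;> simp_all <;> omega) | (intros; simp_all [eq_comm]) | (simp_all [eq_comm]))
    by_cases h0T : 'T' = a
    · subst h0T
      by_cases h1D : 'D' = b
      · subst h1D
        simp_all [bTrieWalk, suffixTrie, walk_dead, walk_noacc, quotes4, quotes3, PySem.Dict.get?] <;> (first | rfl | omega | (split_ifs <;> simp_all <;> omega) | (split <;> simp_all <;> omega) | (intros; simp_all [eq_comm]) | (simp_all [eq_comm]))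
      simp_all [bTrieWalk, suffixTrie, walk_dead, walk_noacc, quotes4, quotes3, PySem.Dict.get?] <;> (first | rfl | omega | (split_ifs <;> simp_all <;> omega) | (split <;> simp_all <;> omega) | (intros; simp_all [eq_comm]) | (simp_all [eq_comm]))
    by_cases h0D : 'D' = a
    · subst h0D
      by_cases h1S : 'S' = b
      · subst h1S
        simp_all [bTrieWalk, suffixTrie, walk_dead, walk_noacc, quotes4, quotes3, PySem.Dict.get?] <;> (first | rfl | omega | (split_ifs <;> simp_all <;> omega) | (split <;> simp_all <;> omega) | (intros; simp_all [eq_comm]) | (simp_all [eq_comm]))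
      simp_all [bTrieWalk, suffixTrie, walk_dead, walk_noacc, quotes4, quotes3, PySem.Dict.get?] <;> (first | rfl | omega | (split_ifs <;> simp_all <;> omega) | (split <;> simp_all <;> omega) | (intros; simp_all [eq_comm]) | (simp_all [eq_comm]))
    by_cases h0H : 'H' = a
    · subst h0H
      by_cases h1T : 'T' = b
      · subst h1T
        simp_all [bTrieWalk, suffixTrie, walk_dead, walk_noacc, quotes4, quotes3, PySem.Dict.get?] <;> (first | rfl | omega | (split_ifs <;> simp_all <;> omega) | (split <;> simp_all <;> omega) | (intros; simp_all [eq_comm]) | (simp_all [eq_comm]))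
      simp_all [bTrieWalk, suffixTrie, walk_dead, walk_noacc, quotes4, quotes3, PySem.Dict.get?] <;> (first | rfl | omega | (split_ifs <;> simp_all <;> omega) | (split <;> simp_all <;> omega) | (intros; simp_all [eq_comm]) | (simp_all [eq_comm]))
    by_cases h0C : 'C' = a
    · subst h0C
      by_cases h1D : 'D' = b
      · subst h1D
        simp_all [bTrieWalk, suffixTrie, walk_dead, walk_noacc, quotes4, quotes3, PySem.Dict.get?] <;> (first | rfl | omega | (split_ifs <;> simp_all <;> omega) | (split <;> simp_all <;> omega) | (intros; simp_all [eq_comm]) | (simp_all [eq_comm]))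
      by_cases h1T : 'T' = b
      · subst h1T
        simp_all [bTrieWalk, suffixTrie, walk_dead, walk_noacc, quotes4, quotes3, PySem.Dict.get?] <;> (first | rfl | omega | (split_ifs <;> simp_all <;> omega) | (split <;> simp_all <;> omega) | (intros; simp_all [eq_comm]) | (simp_all [eq_comm]))
      simp_all [bTrieWalk, suffixTrie, walk_dead, walk_noacc, quotes4, quotes3, PySem.Dict.get?] <;> (first | rfl | omega | (split_ifs <;> simp_all <;> omega) | (split <;> simp_all <;> omega) | (intros; simp_all [eq_comm]) | (simp_all [eq_comm]))
    by_cases h0S : 'S' = a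
    · subst h0S
      by_cases h1D : 'D' = b
      · subst h1D
        simp_all [bTrieWalk, suffixTrie, walk_dead, walk_noacc, quotes4, quotes3, PySem.Dict.get?] <;> (first | rfl | omega | (split_ifs <;> simp_all <;> omega) | (split <;> simp_all <;> omega) | (intros; simp_all [eq_comm]) | (simp_all [eq_comm]))
      simp_all [bTrieWalk, suffixTrie, walk_dead, walk_noacc, quotes4, quotes3, PySem.Dict.get?] <;> (first | rfl | omega | (split_ifs <;> simp_all <;> omega) | (split <;> simp_all <;> omega) | (intros; simp_all [eq_comm]) | (simp_all [eq_comm]))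
    simp_all [bTrieWalk, suffixTrie, walk_dead, walk_noacc, quotes4, quotes3, PySem.Dict.get?] <;> (first | rfl | omega | (split_ifs <;> simp_all <;> omega) | (split <;> simp_all <;> omega) | (intros; simp_all [eq_comm]) | (simp_all [eq_comm]))
  · -- a::b::c::d::rest
    by_cases h0I : 'I' = a
    · subst h0I
      by_cases h1A : 'A' = b
      · subst h1A
        by_cases h2D : 'D' = c
        · subst h2D
          simp_all [bTrieWalk, suffixTrie, walk_dead, walk_noacc, quotes4, quotes3, PySem.Dict.get?] <;> (first | rfl | omega | (split_ifs <;> simp_all <;> omega) | (split <;> simp_all <;> omega) | (intros; simp_all [eq_comm]) | (simp_all [eq_comm]))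
        simp_all [bTrieWalk, suffixTrie, walk_dead, walk_noacc, quotes4, quotes3, PySem.Dict.get?] <;> (first | rfl | omega | (split_ifs <;> simp_all <;> omega) | (split <;> simp_all <;> omega) | (intros; simp_all [eq_comm]) | (simp_all [eq_comm]))
      simp_all [bTrieWalk, suffixTrie, walk_dead, walk_noacc, quotes4, quotes3, PySem.Dict.get?] <;> (first | rfl | omega | (split_ifs <;> simp_all <;> omega) | (split <;> simp_all <;> omega) | (intros; simp_all [eq_comm]) | (simp_all [eq_comm]))
    by_cases h0R : 'R' = a
    · subst h0R
      by_cases h1U : 'U' = b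
      · subst h1U
        by_cases h2E : 'E' = c
        · subst h2E
          simp_all [bTrieWalk, suffixTrie, walk_dead, walk_noacc, quotes4, quotes3, PySem.Dict.get?] <;> (first | rfl | omega | (split_ifs <;> simp_all <;> omega) | (split <;> simp_all <;> omega) | (intros; simp_all [eq_comm]) | (simp_all [eq_comm]))
        simp_all [bTrieWalk, suffixTrie, walk_dead, walk_noacc, quotes4, quotes3, PySem.Dict.get?] <;> (first | rfl | omega | (split_ifs <;> simp_all <;> omega) | (split <;> simp_all <;> omega) | (intros; simp_all [eq_comm]) | (simp_all [eq_comm]))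
      simp_all [bTrieWalk, suffixTrie, walk_dead, walk_noacc, quotes4, quotes3, PySem.Dict.get?] <;> (first | rfl | omega | (split_ifs <;> simp_all <;> omega) | (split <;> simp_all <;> omega) | (intros; simp_all [eq_comm]) | (simp_all [eq_comm]))
    by_cases h0P : 'P' = a
    · subst h0P
      by_cases h1B : 'B' = b
      · subst h1B
        by_cases h2G : 'G' = c
        · subst h2G
          simp_all [bTrieWalk, suffixTrie, walk_dead, walk_noacc, quotes4, quotes3, PySem.Dict.get?] <;> (first | rfl | omega | (split_ifs <;> simp_all <;> omega) | (split <;> simp_all <;> omega) | (intros; simp_all [eq_comm]) | (simp_all [eq_comm]))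
        simp_all [bTrieWalk, suffixTrie, walk_dead, walk_noacc, quotes4, quotes3, PySem.Dict.get?] <;> (first | rfl | omega | (split_ifs <;> simp_all <;> omega) | (split <;> simp_all <;> omega) | (intros; simp_all [eq_comm]) | (simp_all [eq_comm]))
      simp_all [bTrieWalk, suffixTrie, walk_dead, walk_noacc, quotes4, quotes3, PySem.Dict.get?] <;> (first | rfl | omega | (split_ifs <;> simp_all <;> omega) | (split <;> simp_all <;> omega) | (intros; simp_all [eq_comm]) | (simp_all [eq_comm]))
    by_cases h0T : 'T' = a
    · subst h0T
      by_cases h1D : 'D' = b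
      · subst h1D
        by_cases h2S : 'S' = c
        · subst h2S
          by_cases h3U : 'U' = d
          · subst h3U
            simp_all [bTrieWalk, suffixTrie, walk_dead, walk_noacc, quotes4, quotes3, PySem.Dict.get?] <;> (first | rfl | omega | (split_ifs <;> simp_all <;> omega) | (split <;> simp_all <;> omega) | (intros; simp_all [eq_comm]) | (simp_all [eq_comm]))
          simp_all [bTrieWalk, suffixTrie, walk_dead, walk_noacc, quotes4, quotes3, PySem.Dict.get?] <;> (first | rfl | omega | (split_ifs <;> simp_all <;> omega) | (split <;> simp_all <;> omega) | (intros; simp_all [eq_comm]) | (simp_all [eq_comm]))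
        simp_all [bTrieWalk, suffixTrie, walk_dead, walk_noacc, quotes4, quotes3, PySem.Dict.get?] <;> (first | rfl | omega | (split_ifs <;> simp_all <;> omega) | (split <;> simp_all <;> omega) | (intros; simp_all [eq_comm]) | (simp_all [eq_comm]))
      simp_all [bTrieWalk, suffixTrie, walk_dead, walk_noacc, quotes4, quotes3, PySem.Dict.get?] <;> (first | rfl | omega | (split_ifs <;> simp_all <;> omega) | (split <;> simp_all <;> omega) | (intros; simp_all [eq_comm]) | (simp_all [eq_comm]))
    by_cases h0D : 'D' = a
    · subst h0D
      by_cases h1S : 'S' = b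
      · subst h1S
        by_cases h2U : 'U' = c
        · subst h2U
          by_cases h3B : 'B' = d
          · subst h3B
            simp_all [bTrieWalk, suffixTrie, walk_dead, walk_noacc, quotes4, quotes3, PySem.Dict.get?] <;> (first | rfl | omega | (split_ifs <;> simp_all <;> omega) | (split <;> simp_all <;> omega) | (intros; simp_all [eq_comm]) | (simp_all [eq_comm]))
          by_cases h3T : 'T' = d
          · subst h3T
            simp_all [bTrieWalk, suffixTrie, walk_dead, walk_noacc, quotes4, quotes3, PySem.Dict.get?] <;> (first | rfl | omega | (split_ifs <;> simp_all <;> omega) | (split <;> simp_all <;> omega) | (intros; simp_all [eq_comm]) | (simp_all [eq_comm]))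
          simp_all [bTrieWalk, suffixTrie, walk_dead, walk_noacc, quotes4, quotes3, PySem.Dict.get?] <;> (first | rfl | omega | (split_ifs <;> simp_all <;> omega) | (split <;> simp_all <;> omega) | (intros; simp_all [eq_comm]) | (simp_all [eq_comm]))
        simp_all [bTrieWalk, suffixTrie, walk_dead, walk_noacc, quotes4, quotes3, PySem.Dict.get?] <;> (first | rfl | omega | (split_ifs <;> simp_all <;> omega) | (split <;> simp_all <;> omega) | (intros; simp_all [eq_comm]) | (simp_all [eq_comm]))
      simp_all [bTrieWalk, suffixTrie, walk_dead, walk_noacc, quotes4, quotes3, PySem.Dict.get?] <;> (first | rfl | omega | (split_ifs <;> simp_all <;> omega) | (split <;> simp_all <;> omega) | (intros; simp_all [eq_comm]) | (simp_all [eq_comm]))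
    by_cases h0H : 'H' = a
    · subst h0H
      by_cases h1T : 'T' = b
      · subst h1T
        by_cases h2E : 'E' = c
        · subst h2E
          simp_all [bTrieWalk, suffixTrie, walk_dead, walk_noacc, quotes4, quotes3, PySem.Dict.get?] <;> (first | rfl | omega | (split_ifs <;> simp_all <;> omega) | (split <;> simp_all <;> omega) | (intros; simp_all [eq_comm]) | (simp_all [eq_comm]))
        simp_all [bTrieWalk, suffixTrie, walk_dead, walk_noacc, quotes4, quotes3, PySem.Dict.get?] <;> (first | rfl | omega | (split_ifs <;> simp_all <;> omega) | (split <;> simp_all <;> omega) | (intros; simp_all [eq_comm]) | (simp_all [eq_comm]))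
      simp_all [bTrieWalk, suffixTrie, walk_dead, walk_noacc, quotes4, quotes3, PySem.Dict.get?] <;> (first | rfl | omega | (split_ifs <;> simp_all <;> omega) | (split <;> simp_all <;> omega) | (intros; simp_all [eq_comm]) | (simp_all [eq_comm]))
    by_cases h0C : 'C' = a
    · subst h0C
      by_cases h1D : 'D' = b
      · subst h1D
        by_cases h2S : 'S' = c
        · subst h2S
          by_cases h3U : 'U' = d
          · subst h3U
            simp_all [bTrieWalk, suffixTrie, walk_dead, walk_noacc, quotes4, quotes3, PySem.Dict.get?] <;> (first | rfl | omega | (split_ifs <;> simp_all <;> omega) | (split <;> simp_all <;> omega) | (intros; simp_all [eq_comm]) | (simp_all [eq_comm]))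
          simp_all [bTrieWalk, suffixTrie, walk_dead, walk_noacc, quotes4, quotes3, PySem.Dict.get?] <;> (first | rfl | omega | (split_ifs <;> simp_all <;> omega) | (split <;> simp_all <;> omega) | (intros; simp_all [eq_comm]) | (simp_all [eq_comm]))
        simp_all [bTrieWalk, suffixTrie, walk_dead, walk_noacc, quotes4, quotes3, PySem.Dict.get?] <;> (first | rfl | omega | (split_ifs <;> simp_all <;> omega) | (split <;> simp_all <;> omega) | (intros; simp_all [eq_comm]) | (simp_all [eq_comm]))
      by_cases h1T : 'T' = b
      · subst h1T
        by_cases h2B : 'B' = c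
        · subst h2B
          simp_all [bTrieWalk, suffixTrie, walk_dead, walk_noacc, quotes4, quotes3, PySem.Dict.get?] <;> (first | rfl | omega | (split_ifs <;> simp_all <;> omega) | (split <;> simp_all <;> omega) | (intros; simp_all [eq_comm]) | (simp_all [eq_comm]))
        simp_all [bTrieWalk, suffixTrie, walk_dead, walk_noacc, quotes4, quotes3, PySem.Dict.get?] <;> (first | rfl | omega | (split_ifs <;> simp_all <;> omega) | (split <;> simp_all <;> omega) | (intros; simp_all [eq_comm]) | (simp_all [eq_comm]))
      simp_all [bTrieWalk, suffixTrie, walk_dead, walk_noacc, quotes4, quotes3, PySem.Dict.get?] <;> (first | rfl | omega | (split_ifs <;> simp_all <;> omega) | (split <;> simp_all <;> omega) | (intros; simp_all [eq_comm]) | (simp_all [eq_comm]))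
    by_cases h0S : 'S' = a
    · subst h0S
      by_cases h1D : 'D' = b
      · subst h1D
        by_cases h2S : 'S' = c
        · subst h2S
          by_cases h3U : 'U' = d
          · subst h3U
            simp_all [bTrieWalk, suffixTrie, walk_dead, walk_noacc, quotes4, quotes3, PySem.Dict.get?] <;> (first | rfl | omega | (split_ifs <;> simp_all <;> omega) | (split <;> simp_all <;> omega) | (intros; simp_all [eq_comm]) | (simp_all [eq_comm]))
          simp_all [bTrieWalk, suffixTrie, walk_dead, walk_noacc, quotes4, quotes3, PySem.Dict.get?] <;> (first | rfl | omega | (split_ifs <;> simp_all <;> omega) | (split <;> simp_all <;> omega) | (intros; simp_all [eq_comm]) | (simp_all [eq_comm]))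
        simp_all [bTrieWalk, suffixTrie, walk_dead, walk_noacc, quotes4, quotes3, PySem.Dict.get?] <;> (first | rfl | omega | (split_ifs <;> simp_all <;> omega) | (split <;> simp_all <;> omega) | (intros; simp_all [eq_comm]) | (simp_all [eq_comm]))
      simp_all [bTrieWalk, suffixTrie, walk_dead, walk_noacc, quotes4, quotes3, PySem.Dict.get?] <;> (first | rfl | omega | (split_ifs <;> simp_all <;> omega) | (split <;> simp_all <;> omega) | (intros; simp_all [eq_comm]) | (simp_all [eq_comm]))
    simp_all [bTrieWalk, suffixTrie, walk_dead, walk_noacc, quotes4, quotes3, PySem.Dict.get?] <;> (first | rfl | omega | (split_ifs <;> simp_all <;> omega) | (split <;> simp_all <;> omega) | (intros; simp_all [eq_comm]) | (simp_all [eq_comm]))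

lemma loops_agree (s : List Char) :
    (match aQuoteLoop s cryptoQuotesSorted with
      | some r => r
      | none => s ++ ['/','U','S','D','T']) =
    (let best := bTrieWalk s.length s.reverse 0 0 0
     if best ≠ 0 then
       PySem.List.slice s none (some (-(best : Int))) ++
         '/' :: PySem.List.slice s (some (-(best : Int))) none
     else s ++ ['/','U','S','D','T']) := by
  have hsplit : cryptoQuotesSorted = quotes4 ++ quotes3 := by rfl
  have hA : aQuoteLoop s cryptoQuotesSorted =
      if 4 < s.length ∧ sufN s 4 ∈ quotes4 then
        some (PySem.List.slice s none (some (-(4 : Int))) ++ '/' :: sufN s 4)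
      else if 3 < s.length ∧ sufN s 3 ∈ quotes3 then
        some (PySem.List.slice s none (some (-(3 : Int))) ++ '/' :: sufN s 3)
      else none := by
    rw [hsplit, aQuoteLoop_append,
        aQuoteLoop_group s 4 quotes4 (by decide),
        aQuoteLoop_group s 3 quotes3 (by decide)]
    by_cases hc : 4 < s.length ∧ sufN s 4 ∈ quotes4 <;> simp [hc]
  have htk : ∀ n : Nat, (s.reverse.take n).reverse = sufN s n := by
    intro n; rw [List.take_reverse, List.reverse_reverse]; rfl
  have hB : bTrieWalk s.length s.reverse 0 0 0 =
      if 4 < s.length ∧ sufN s 4 ∈ quotes4 then 4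
      else if 3 < s.length ∧ sufN s 3 ∈ quotes3 then 3
      else 0 := by
    have := bTrieWalk_char s.reverse
    rwa [List.length_reverse, htk 4, htk 3] at this
  rw [hA, hB]
  by_cases h4 : 4 < s.length ∧ sufN s 4 ∈ quotes4
  · have s4 : PySem.List.slice s (some (-4 : Int)) none = sufN s 4 := by
      have := slice_from_eq_sufN s 4 (by norm_num); norm_num at this; exact this
    simp [h4, s4]
  · by_cases h3 : 3 < s.length ∧ sufN s 3 ∈ quotes3
    · have s3 : PySem.List.slice s (some (-3 : Int)) none = sufN s 3 := by
        have := slice_from_eq_sufN s 3 (by norm_num); norm_num at this; exact this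
      simp [h4, h3, s3]
    · simp [h4, h3]

-- ===== VERDICT (by name: the statement is the Claim_ definition above) =====
theorem normalize_ccxt_symbol_py_spec : Claim_equal_normalize_ccxt_symbol_py := by
  intro symbol _
  unfold Spec_normalize_ccxt_symbol_py
  unfold normalize_ccxt_symbol_py normalize_ccxt_symbol_py_alt
  simp only []
  set s := PySem.Chars.upper (PySem.Chars.strip symbol.toList) with hs
  by_cases h1 : PySem.Chars.isIn ['/'] s = true
  · simp [h1]
  · by_cases h2 : PySem.Chars.isIn ['-'] s = true
    · simp [h1, h2]
    · simp only [h1, h2, if_false, Bool.false_eq_true]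
      rw [← apply_ite String.ofList, ← loops_agree s]
      cases aQuoteLoop s cryptoQuotesSorted <;> rfl
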